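-- pv_equiv track=rewrite | github.com/qiboteam/qibochem | src/qibochem/ansatz/util.py | generate_excitations
-- ===== SOURCE A (Python) =====
-- def generate_excitations(order, excite_from, excite_to, conserve_spin=True):
--     """
--     Generate all possible excitations between a list of occupied and virtual orbitals
--
--     Args:
--         order: Order of excitations, i.e. 1 == single, 2 == double
--         excite_from: Iterable of integers
--         excite_to: Iterable of integers
--         conserve_spin: ensure that the total electronic spin is conserved
--
--     Return:
--         List of lists, e.g. [[0, 1]]
--     """
--     # If order of excitation > either number of electrons/orbitals, return list of empty list
--     if order > min(len(excite_from), len(excite_to)):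
--         return [[]]
--
--     # Generate all possible excitations first
--     from itertools import combinations  # pylint: disable=C0415
--
--     all_excitations = [
--         [*_from, *_to] for _from in combinations(excite_from, order) for _to in combinations(excite_to, order)
--     ]
--     # Filter out the excitations if conserve_spin set
--     if conserve_spin:
--         # Not sure if this filtering is exhaustive; might not remove some redundant excitations?
--         all_excitations = [
--             _ex
--             for _ex in all_excitations
--             if sum(_ex) % 2 == 0 and (sum(_i % 2 for _i in _ex[:order]) == sum(_i % 2 for _i in _ex[order:]))
--         ]
--     return all_excitations
-- ===== SOURCE B (Python) =====
-- from itertools import combinations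
--
--
-- def generate_excitations(order, excite_from, excite_to, conserve_spin=True):
--     if order > min(len(excite_from), len(excite_to)):
--         return [[]]
--     if not conserve_spin:
--         return [[*f, *t] for f in combinations(excite_from, order) for t in combinations(excite_to, order)]
--     # bucket the `to`-combinations by their number of odd orbitals (insertion order kept)
--     buckets = {}
--     for t in combinations(excite_to, order):
--         buckets.setdefault(sum(x % 2 for x in t), []).append(t)
--     result = []
--     for f in combinations(excite_from, order):
--         for t in buckets.get(sum(x % 2 for x in f), []):
--             result.append([*f, *t])
--     return result
-- ===== Notes on version B (the rewrite author's own statement) =====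
-- stated objective: faster
-- what changed: Replaces the filter over the full Cartesian product of from/to combinations by grouping the to-combinations once into a dict keyed by their odd-orbital count and joining each from-combination only with its matching bucket; the redundant sum%2==0 test is dropped since equal odd counts force an even total.
import Mathlib
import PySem

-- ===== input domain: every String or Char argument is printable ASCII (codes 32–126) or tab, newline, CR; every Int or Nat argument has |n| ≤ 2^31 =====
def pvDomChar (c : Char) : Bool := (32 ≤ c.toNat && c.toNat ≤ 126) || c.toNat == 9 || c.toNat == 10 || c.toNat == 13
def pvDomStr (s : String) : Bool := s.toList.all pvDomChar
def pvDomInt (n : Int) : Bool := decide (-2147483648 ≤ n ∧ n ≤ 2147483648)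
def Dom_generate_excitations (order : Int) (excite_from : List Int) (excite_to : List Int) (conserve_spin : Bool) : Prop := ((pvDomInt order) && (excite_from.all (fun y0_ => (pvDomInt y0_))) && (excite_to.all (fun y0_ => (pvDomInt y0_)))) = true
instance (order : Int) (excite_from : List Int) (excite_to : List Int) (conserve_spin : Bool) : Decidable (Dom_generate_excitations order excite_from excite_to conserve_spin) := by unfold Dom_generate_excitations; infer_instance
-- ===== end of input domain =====

-- B buckets the to-combinations by odd-orbital count once instead of filtering the full Cartesian product (objective: faster, constant-factor: the per-pair parity test disappears).

-- ===== PORT A =====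
def generate_excitations (order : Int) (excite_from : List Int) (excite_to : List Int) (conserve_spin : Bool) : List (List Int) :=
  if order > min (excite_from.length : Int) (excite_to.length : Int) then [[]]
  else
    let all_excitations := (PySem.List.combinations excite_from order.toNat).flatMap
      (fun _from => (PySem.List.combinations excite_to order.toNat).map (fun _to => _from ++ _to))
    if conserve_spin then
      all_excitations.filter (fun _ex =>
        PySem.Int.mod _ex.sum 2 == 0 &&
        ((PySem.List.slice _ex none (some order)).map (fun _i => PySem.Int.mod _i 2)).sum
          == ((PySem.List.slice _ex (some order) none).map (fun _i => PySem.Int.mod _i 2)).sum)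
    else all_excitations

-- ===== PORT B =====
-- sum(x % 2 for x in xs): the number of odd-parity orbitals
def pvOdd (xs : List Int) : Int := (xs.map (fun x => PySem.Int.mod x 2)).sum

def generate_excitations_alt (order : Int) (excite_from : List Int) (excite_to : List Int) (conserve_spin : Bool) : List (List Int) :=
  if order > min (excite_from.length : Int) (excite_to.length : Int) then [[]]
  else if !conserve_spin then
    (PySem.List.combinations excite_from order.toNat).flatMap
      (fun f => (PySem.List.combinations excite_to order.toNat).map (fun t => f ++ t))
  else
    -- buckets.setdefault(sum(x % 2 for x in t), []).append(t)
    let buckets := (PySem.List.combinations excite_to order.toNat).foldl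
      (fun d t => d.modify (pvOdd t) [] (· ++ [t])) PySem.Dict.empty
    (PySem.List.combinations excite_from order.toNat).foldl
      (fun acc f => acc ++ (buckets.getD (pvOdd f) []).map (fun t => f ++ t)) []

-- ===== PRECONDITION & SPEC =====
-- Pre_ excludes negative order, on which Python's combinations(…, order) raises ValueError (in A and in B alike).
def Pre_generate_excitations (order : Int) (excite_from : List Int) (excite_to : List Int) (conserve_spin : Bool) : Prop := 0 ≤ order
instance (order : Int) (excite_from : List Int) (excite_to : List Int) (conserve_spin : Bool) : Decidable (Pre_generate_excitations order excite_from excite_to conserve_spin) := by unfold Pre_generate_excitations; infer_instance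
def pvWitness_generate_excitations : Int × List Int × List Int × Bool := (1, [0, 1], [2, 3], true)

def Spec_generate_excitations (order : Int) (excite_from : List Int) (excite_to : List Int) (conserve_spin : Bool) (out : List (List Int)) : Prop := out = generate_excitations_alt order excite_from excite_to conserve_spin
instance (order : Int) (excite_from : List Int) (excite_to : List Int) (conserve_spin : Bool) (out : List (List Int)) : Decidable (Spec_generate_excitations order excite_from excite_to conserve_spin out) := by unfold Spec_generate_excitations; infer_instance

-- ===== CLAIM (what is proved, stated in full; the proofs are below) =====
def Claim_equal_generate_excitations : Prop := ∀ (order : Int) (excite_from : List Int) (excite_to : List Int) (conserve_spin : Bool), Dom_generate_excitations order excite_from excite_to conserve_spin → Pre_generate_excitations order excite_from excite_to conserve_spin → Spec_generate_excitations order excite_from excite_to conserve_spin (generate_excitations order excite_from excite_to conserve_spin)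

-- ===== LEMMAS AND PROOFS =====

-- a sum is congruent to the sum of the parities mod 2
lemma sum_emod_two (xs : List Int) : xs.sum % 2 = (xs.map (fun x => x % 2)).sum % 2 := by
  induction xs with
  | nil => rfl
  | cons x xs ih => simp only [List.map_cons, List.sum_cons]; omega

-- the bucket at key k holds exactly the to-combinations with odd count k, in order
lemma bucket_getD (ts : List (List Int)) (k : Int) :
    ((ts.foldl (fun d t => d.modify (pvOdd t) [] (· ++ [t])) PySem.Dict.empty).getD k [])
      = ts.filter (fun t => pvOdd t == k) := by
  have h := PySem.Dict.getD_foldl_modify_append (l := ts.map (fun t => (pvOdd t, t)))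
      (d := (PySem.Dict.empty : PySem.Dict Int (List (List Int)))) (c := k)
  rw [List.foldl_map] at h
  simpa [Function.comp_def, List.filter_map] using h

-- ===== VERDICT (by name: the statement is the Claim_ definition above) =====
theorem generate_excitations_spec : Claim_equal_generate_excitations := by
  intro order excite_from excite_to conserve_spin _ hpre
  unfold Spec_generate_excitations generate_excitations generate_excitations_alt
  by_cases hg : order > min (excite_from.length : Int) (excite_to.length : Int)
  · simp [hg]
  · simp only [if_neg hg]
    cases conserve_spin with
    | false => simp
    | true =>
      simp only [Bool.not_true, Bool.false_eq_true, if_false]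
      rw [PySem.List.foldl_append_eq_flatMap, List.filter_flatMap]
      simp only [List.nil_append]
      apply List.flatMap_congr
      intro f hf
      have hflen : f.length = order.toNat := PySem.List.length_of_mem_combinations hf
      rw [bucket_getD, List.filter_map]
      congr 1
      apply List.filter_congr
      intro t ht
      have horder : (order.toNat : Int) = order := Int.toNat_of_nonneg hpre
      have h1 : PySem.List.slice (f ++ t) none (some order) = f := by
        rw [← horder, PySem.List.slice_to_natCast, List.take_append_of_le_length (by omega),
          List.take_of_length_le (by omega)]
      have h2 : PySem.List.slice (f ++ t) (some order) none = t := by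
        rw [← horder, PySem.List.slice_from_natCast, List.drop_append_of_le_length (by omega),
          List.drop_of_length_le (by omega), List.nil_append]
      have hsf := sum_emod_two f
      have hst := sum_emod_two t
      simp only [Function.comp, h1, h2, pvOdd,
        PySem.Int.mod_eq_emod_of_pos (by omega : (0:Int) < 2), List.sum_append]
      by_cases heq : (f.map (fun x => x % 2)).sum = (t.map (fun x => x % 2)).sum
      · have hmod : (f.sum + t.sum) % 2 = 0 := by omega
        simp [hmod, heq]
      · rw [beq_eq_false_iff_ne.mpr heq, beq_eq_false_iff_ne.mpr (Ne.symm heq), Bool.and_false]
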